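-- pv_equiv track=rewrite | github.com/FinHackCN/startquant | chanlun.py | hebin1
-- ===== SOURCE A (Python) =====
-- def hebin1(H,L):
--     i=1
--     H=list(H)
--     L=list(L)
--     m=len(L)
--     X=[]
--     while i <=m-1:
--         q=i-len(X)
--         if H[q-1]==H[q+1-1] and L[q-1]==L[q+1-1]:
--             del H[q-1]
--             del L[q-1]
--             X.append(i-1)
--         i=i+1
--     return H,L,X
-- ===== SOURCE B (Python) =====
-- def hebin1(H, L):
--     m = len(L)
--     nH, nL, X = [], [], []
--     for j in range(m - 1):
--         if H[j] == H[j + 1] and L[j] == L[j + 1]: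
--             X.append(j)
--         else:
--             nH.append(H[j])
--             nL.append(L[j])
--     nH += H[m - 1:] if m > 0 else list(H)
--     nL += L[m - 1:]
--     return nH, nL, X
-- ===== Notes on version B (the rewrite author's own statement) =====
-- stated objective: alternative
-- what changed: Replaced the while-loop that repeatedly deletes elements in place from the middle of the lists (tracking a shifting index q=i-len(X)) by a single pass over adjacent index pairs of the original lists that appends kept elements to fresh output lists.
import Mathlib
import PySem

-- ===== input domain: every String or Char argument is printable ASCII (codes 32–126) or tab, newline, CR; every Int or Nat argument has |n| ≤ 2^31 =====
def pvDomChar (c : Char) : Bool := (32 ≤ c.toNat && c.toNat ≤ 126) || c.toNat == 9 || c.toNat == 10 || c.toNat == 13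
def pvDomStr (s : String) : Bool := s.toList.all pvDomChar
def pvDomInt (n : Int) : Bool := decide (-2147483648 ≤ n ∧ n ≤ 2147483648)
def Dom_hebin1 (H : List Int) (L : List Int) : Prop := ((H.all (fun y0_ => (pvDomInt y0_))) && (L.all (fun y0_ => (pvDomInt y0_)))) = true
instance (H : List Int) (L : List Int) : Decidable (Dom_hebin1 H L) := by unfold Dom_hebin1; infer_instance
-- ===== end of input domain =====

-- B replaces the del-in-place while loop (with its shifting index q = i - len(X)) by a
-- single pass over adjacent index pairs of the original lists that appends kept elements
-- to fresh output lists; equal return values proved below.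

-- ===== PORT A =====
-- one iteration of A's while body; recursion on the remaining trip count (the loop
-- runs exactly (m-1) - (i-1) more times since i increases by 1 each iteration).
-- On an IndexError (pop? = none, impossible inside Pre_) the state is returned as-is.
def hebin1LoopA : Nat → Int → List Int → List Int → List Int → (List Int × List Int × List Int)
  | 0, _, H, L, X => (H, L, X)
  | n + 1, i, H, L, X =>
    let q : Int := i - (X.length : Int)
    if PySem.List.pyGet? H (q - 1) = PySem.List.pyGet? H (q + 1 - 1) ∧
       PySem.List.pyGet? L (q - 1) = PySem.List.pyGet? L (q + 1 - 1) then
      match PySem.List.pop? H (q - 1), PySem.List.pop? L (q - 1) with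
      | some (_, H'), some (_, L') => hebin1LoopA n (i + 1) H' L' (X ++ [i - 1])
      | _, _ => (H, L, X)
    else
      hebin1LoopA n (i + 1) H L X

def hebin1 (H : List Int) (L : List Int) : List (List Int) :=
  let m : Int := (L.length : Int)
  let r := hebin1LoopA (m - 1).toNat 1 H L []
  [r.1, r.2.1, r.2.2]

-- ===== PORT B =====
def hebin1_alt (H : List Int) (L : List Int) : List (List Int) :=
  let m : Int := (L.length : Int)
  let s := (PySem.List.pyRange 0 (m - 1) 1).foldl
    (fun (s : List Int × List Int × List Int) (j : Int) =>
      if PySem.List.pyGet? H j = PySem.List.pyGet? H (j + 1) ∧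
         PySem.List.pyGet? L j = PySem.List.pyGet? L (j + 1) then
        (s.1, s.2.1, s.2.2 ++ [j])
      else
        (s.1 ++ [PySem.List.pyGetD H j 0], s.2.1 ++ [PySem.List.pyGetD L j 0], s.2.2))
    ([], [], [])
  let nH := s.1 ++ (if m > 0 then PySem.List.slice H (some (m - 1)) none else H)
  let nL := s.2.1 ++ PySem.List.slice L (some (m - 1)) none
  [nH, nL, s.2.2]

-- ===== PRECONDITION & SPEC =====
-- A raises IndexError exactly when H is shorter than L and L has at least two
-- elements; those inputs are excluded (B raises IndexError there too).
def Pre_hebin1 (H : List Int) (L : List Int) : Prop :=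
  L.length ≤ H.length ∨ L.length ≤ 1
instance (H : List Int) (L : List Int) : Decidable (Pre_hebin1 H L) := by unfold Pre_hebin1; infer_instance

def pvWitness_hebin1 : List Int × List Int := ([3, 3, 5, 5, 5, 7], [1, 1, 2, 2, 2, 4])

def Spec_hebin1 (H : List Int) (L : List Int) (out : List (List Int)) : Prop := out = hebin1_alt H L
instance (H : List Int) (L : List Int) (out : List (List Int)) : Decidable (Spec_hebin1 H L out) := by unfold Spec_hebin1; infer_instance

-- ===== CLAIM (what is proved, stated in full; the proofs are below) =====
def Claim_equal_hebin1 : Prop := ∀ (H : List Int) (L : List Int), Dom_hebin1 H L → Pre_hebin1 H L → Spec_hebin1 H L (hebin1 H L)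


-- ===== LEMMAS AND PROOFS =====

-- whether original pair j equals original pair j+1 (the comparison both loops make)
def pvCondB (H L : List Int) (j : Nat) : Bool :=
  decide (PySem.List.pyGet? H (j : Int) = PySem.List.pyGet? H ((j : Int) + 1)) &&
  decide (PySem.List.pyGet? L (j : Int) = PySem.List.pyGet? L ((j : Int) + 1))

-- elements of xs at the kept / removed indices among the first k pairs
def pvKeep (H L xs : List Int) (k : Nat) : List Int :=
  ((List.range k).filter (fun j => ! pvCondB H L j)).map (fun j => xs.getD j 0)

def pvRem (H L : List Int) (k : Nat) : List Int :=
  ((List.range k).filter (pvCondB H L)).map (fun j => (j : Int))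

lemma pvKeep_length_eq (H L xs ys : List Int) (k : Nat) :
    (pvKeep H L xs k).length = (pvKeep H L ys k).length := by
  simp [pvKeep]

lemma pvKeep_rem_length (H L xs : List Int) (k : Nat) :
    (pvKeep H L xs k).length + (pvRem H L k).length = k := by
  have h1 : (pvKeep H L xs k).length
      = (List.filter (fun j => ! pvCondB H L j) (List.range k)).length := by
    simp [pvKeep]
  have h2 : (pvRem H L k).length
      = (List.filter (pvCondB H L) (List.range k)).length := by
    simp [pvRem]
  have h3 : (List.range k).length = ((List.range k).filter (pvCondB H L)).length
      + ((List.range k).filter (fun x => ! pvCondB H L x)).length :=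
    List.length_eq_length_filter_add (pvCondB H L)
  simp only [List.length_range] at h3
  omega

lemma pvGet_mid (pre xs : List Int) (k j : Nat) (h : k + j < xs.length) :
    PySem.List.pyGet? (pre ++ xs.drop k) ((pre.length : Int) + (j : Int)) = some xs[k + j] := by
  have : ((pre.length : Int) + (j : Int)) = ((pre.length + j : Nat) : Int) := by push_cast; ring
  rw [this, PySem.List.pyGet?_natCast, List.getElem?_append_right (by omega)]
  simp only [Nat.add_sub_cancel_left, List.getElem?_drop]
  exact List.getElem?_eq_getElem (by omega)

lemma pvCondB_iff (H L : List Int) (k : Nat) (hH : k + 1 < H.length) (hL : k + 1 < L.length) :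
    pvCondB H L k = true ↔ (H[k] = H[k + 1] ∧ L[k] = L[k + 1]) := by
  have cast1 : ((k : Int) + 1) = ((k + 1 : Nat) : Int) := by push_cast; ring
  simp only [pvCondB, cast1, PySem.List.pyGet?_natCast,
    List.getElem?_eq_getElem (show k < H.length by omega),
    List.getElem?_eq_getElem (show k + 1 < H.length from hH),
    List.getElem?_eq_getElem (show k < L.length by omega),
    List.getElem?_eq_getElem (show k + 1 < L.length from hL),
    Bool.and_eq_true, decide_eq_true_eq, Option.some.injEq]

lemma pvKeep_succ_true (H L xs : List Int) (k : Nat) (hc : pvCondB H L k = true) :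
    pvKeep H L xs (k + 1) = pvKeep H L xs k := by
  simp [pvKeep, List.range_succ, List.filter_append, hc]

lemma pvKeep_succ_false (H L xs : List Int) (k : Nat) (hc : ¬ pvCondB H L k = true) :
    pvKeep H L xs (k + 1) = pvKeep H L xs k ++ [xs.getD k 0] := by
  simp [pvKeep, List.range_succ, List.filter_append, hc]

lemma pvRem_succ_true (H L : List Int) (k : Nat) (hc : pvCondB H L k = true) :
    pvRem H L (k + 1) = pvRem H L k ++ [(k : Int)] := by
  simp [pvRem, List.range_succ, List.filter_append, hc]

lemma pvRem_succ_false (H L : List Int) (k : Nat) (hc : ¬ pvCondB H L k = true) :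
    pvRem H L (k + 1) = pvRem H L k := by
  simp [pvRem, List.range_succ, List.filter_append, hc]

lemma pvEraseIdx_append (pre ys : List Int) :
    (pre ++ ys).eraseIdx pre.length = pre ++ ys.eraseIdx 0 := by
  induction pre with
  | nil => simp
  | cons a t ih => simp [ih]

lemma pvPop_mid (pre xs : List Int) (k : Nat) (h : k < xs.length) :
    PySem.List.pop? (pre ++ xs.drop k) ((pre.length : Int))
      = some (xs[k], pre ++ xs.drop (k + 1)) := by
  have hlt : pre.length < (pre ++ xs.drop k).length := by
    simp only [List.length_append, List.length_drop]; omega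
  rw [PySem.List.pop?_natCast (pre ++ xs.drop k) pre.length hlt]
  congr 1
  refine Prod.ext ?_ ?_
  · show (pre ++ xs.drop k)[pre.length]'hlt = xs[k]
    rw [List.getElem_append_right (le_refl _)]
    simp
  · show (pre ++ xs.drop k).eraseIdx pre.length = pre ++ xs.drop (k + 1)
    rw [pvEraseIdx_append, List.eraseIdx_zero, List.tail_drop]

-- the spine of A's while loop: after k iterations the state is the kept prefix
-- plus the untouched suffix, and running it to the end yields the state at m-1
lemma pvLoopA_inv (H L : List Int) (hm : L.length ≤ H.length) :
    ∀ (n k : Nat), n + k = L.length - 1 →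
    hebin1LoopA n ((k : Int) + 1)
        (pvKeep H L H k ++ H.drop k) (pvKeep H L L k ++ L.drop k) (pvRem H L k)
      = (pvKeep H L H (L.length - 1) ++ H.drop (L.length - 1),
         pvKeep H L L (L.length - 1) ++ L.drop (L.length - 1),
         pvRem H L (L.length - 1)) := by
  intro n
  induction n with
  | zero =>
    intro k hk
    have : k = L.length - 1 := by omega
    subst this
    rfl
  | succ n ih =>
    intro k hk
    have hL1 : k + 1 < L.length := by omega
    have hH1 : k + 1 < H.length := by omega
    have hlen := pvKeep_rem_length H L H k
    have hlenL := pvKeep_length_eq H L L H k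
    have hq1 : ((k : Int) + 1) - ((pvRem H L k).length : Int) - 1
        = ((pvKeep H L H k).length : Int) := by push_cast; omega
    have hq2 : ((k : Int) + 1) - ((pvRem H L k).length : Int) + 1 - 1
        = ((pvKeep H L H k).length : Int) + ((1 : Nat) : Int) := by push_cast; omega
    have hgH0 := pvGet_mid (pvKeep H L H k) H k 0 (by omega)
    have hgH1 := pvGet_mid (pvKeep H L H k) H k 1 (by omega)
    have hgL0 := pvGet_mid (pvKeep H L L k) L k 0 (by omega)
    have hgL1 := pvGet_mid (pvKeep H L L k) L k 1 (by omega)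
    simp only [Nat.cast_zero, add_zero] at hgH0 hgL0
    rw [hlenL] at hgL0 hgL1
    have hstep : ((k : Int) + 1) + 1 = (((k + 1 : Nat) : Int) + 1) := by push_cast; ring
    simp only [hebin1LoopA, hq1, hq2, hgH0, hgH1, hgL0, hgL1, Option.some.injEq]
    by_cases hc : pvCondB H L k = true
    · -- pair k is equal to pair k+1: it is removed
      obtain ⟨hH, hL⟩ := (pvCondB_iff H L k hH1 hL1).mp hc
      have hpopH := pvPop_mid (pvKeep H L H k) H k (by omega)
      have hpopL := pvPop_mid (pvKeep H L L k) L k (by omega)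
      rw [hlenL] at hpopL
      rw [if_pos ⟨hH, hL⟩]
      simp only [hpopH, hpopL]
      have hX : pvRem H L k ++ [(k : Int) + 1 - 1] = pvRem H L (k + 1) := by
        rw [pvRem_succ_true H L k hc]; norm_num
      rw [hX, ← pvKeep_succ_true H L H k hc, ← pvKeep_succ_true H L L k hc, hstep]
      exact ih (k + 1) (by omega)
    · -- pair k differs from pair k+1: it is kept
      rw [if_neg (by rw [pvCondB_iff H L k hH1 hL1] at hc; exact hc)]
      have hsplit : ∀ xs : List Int, k < xs.length →
          pvKeep H L xs k ++ xs.drop k = pvKeep H L xs (k + 1) ++ xs.drop (k + 1) := by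
        intro xs hx
        rw [pvKeep_succ_false H L xs k hc, List.drop_eq_getElem_cons hx,
          List.getD_eq_getElem xs 0 hx]
        simp
      rw [hsplit H (by omega), hsplit L (by omega), ← pvRem_succ_false H L k hc, hstep]
      exact ih (k + 1) (by omega)

-- the spine of B's for loop over range(m-1)
lemma pvFoldB (H L : List Int) (k : Nat) :
    (List.range k).foldl
      (fun (s : List Int × List Int × List Int) (j : Nat) =>
        if PySem.List.pyGet? H (j : Int) = PySem.List.pyGet? H ((j : Int) + 1) ∧
           PySem.List.pyGet? L (j : Int) = PySem.List.pyGet? L ((j : Int) + 1) then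
          (s.1, s.2.1, s.2.2 ++ [(j : Int)])
        else
          (s.1 ++ [PySem.List.pyGetD H (j : Int) 0], s.2.1 ++ [PySem.List.pyGetD L (j : Int) 0], s.2.2))
      ([], [], [])
      = (pvKeep H L H k, pvKeep H L L k, pvRem H L k) := by
  induction k with
  | zero => rfl
  | succ k ih =>
    rw [List.range_succ, List.foldl_append, ih]
    by_cases hc : pvCondB H L k = true
    · have hp : PySem.List.pyGet? H (k : Int) = PySem.List.pyGet? H ((k : Int) + 1) ∧
          PySem.List.pyGet? L (k : Int) = PySem.List.pyGet? L ((k : Int) + 1) := by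
        simpa [pvCondB] using hc
      simp only [List.foldl_cons, List.foldl_nil, if_pos hp,
        pvKeep_succ_true H L H k hc, pvKeep_succ_true H L L k hc, pvRem_succ_true H L k hc]
    · have hp : ¬ (PySem.List.pyGet? H (k : Int) = PySem.List.pyGet? H ((k : Int) + 1) ∧
          PySem.List.pyGet? L (k : Int) = PySem.List.pyGet? L ((k : Int) + 1)) := by
        simpa [pvCondB] using hc
      simp only [List.foldl_cons, List.foldl_nil, if_neg hp,
        pvKeep_succ_false H L H k hc, pvKeep_succ_false H L L k hc, pvRem_succ_false H L k hc,
        PySem.List.pyGetD_natCast]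

-- B's value, in the same kept-prefix-plus-suffix form (for nonempty L)
lemma pvAlt_eq (H L : List Int) (h1 : 1 ≤ L.length) :
    hebin1_alt H L
      = [pvKeep H L H (L.length - 1) ++ H.drop (L.length - 1),
         pvKeep H L L (L.length - 1) ++ L.drop (L.length - 1),
         pvRem H L (L.length - 1)] := by
  have hm1 : ((L.length : Int) - 1) = ((L.length - 1 : Nat) : Int) := by omega
  simp only [hebin1_alt, hm1, PySem.List.pyRange_zero_natCast, List.foldl_map, pvFoldB,
    PySem.List.slice_from_natCast,
    if_pos (show (L.length : Int) > 0 by exact_mod_cast h1)]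

lemma pvA_eq (H L : List Int) (hpre : Pre_hebin1 H L) (h1 : 1 ≤ L.length) :
    hebin1 H L
      = [pvKeep H L H (L.length - 1) ++ H.drop (L.length - 1),
         pvKeep H L L (L.length - 1) ++ L.drop (L.length - 1),
         pvRem H L (L.length - 1)] := by
  have hfuel : ((L.length : Int) - 1).toNat = L.length - 1 := by omega
  rcases Nat.lt_or_ge L.length 2 with h2 | h2
  · -- exactly one element: the loop body never runs
    have : L.length = 1 := by omega
    simp [hebin1, hebin1LoopA, this, pvKeep, pvRem]
  · have hm : L.length ≤ H.length := by
      rcases hpre with h | h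
      · exact h
      · omega
    have h0 := pvLoopA_inv H L hm (L.length - 1) 0 (by omega)
    have e1 : pvKeep H L H 0 = [] := rfl
    have e2 : pvKeep H L L 0 = [] := rfl
    have e3 : pvRem H L 0 = [] := rfl
    rw [e1, e2, e3] at h0
    norm_num at h0
    simp only [hebin1, hfuel, h0]

-- ===== VERDICT (by name: the statement is the Claim_ definition above) =====
theorem hebin1_spec : Claim_equal_hebin1 := by
  intro H L _hdom hpre
  unfold Spec_hebin1
  rcases Nat.eq_zero_or_pos L.length with h0 | h1
  · -- L is empty: both return the inputs unchanged
    have : L = [] := List.eq_nil_of_length_eq_zero h0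
    subst this
    simp [hebin1, hebin1_alt, hebin1LoopA, PySem.List.slice_from_neg_one]
  · rw [pvA_eq H L hpre h1, pvAlt_eq H L h1]
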